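-- pv_equiv track=rewrite | github.com/denwong47/alphabet_mask | src/py/alphabet_mask/python.py | mask_to_chars
-- ===== SOURCE A (Python) =====
-- def mask_to_chars(mask: int) -> str:
--     """
--     Convert a mask created by :func:`alphabet_mask` to a string of characters.
--     """
--     chars = ""
--     for i in range(32):
--         if mask & (1 << i):
--             _mapper = {
--                 0: " ",
--                 27: ".",
--                 28: ",",
--                 29: "'",
--                 30: "-",
--                 31: '"',
--             }
--             chars += _mapper.get(i, chr(i + 96))
--
--     return chars
-- ===== SOURCE B (Python) =====
-- # Table-driven approach: four precomputed 256-entry tables (one per byte position)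
-- # map each byte value directly to its decoded fragment; a call is just four lookups.
-- _CHARS = " abcdefghijklmnopqrstuvwxyz.,'-\""
--
-- _TABLES = [
--     ["".join(_CHARS[pos * 8 + i] for i in range(8) if v >> i & 1) for v in range(256)]
--     for pos in range(4)
-- ]
--
--
-- def mask_to_chars(mask: int) -> str:
--     """
--     Convert a mask created by :func:`alphabet_mask` to a string of characters.
--     """
--     m = mask & 0xFFFFFFFF
--     return (
--         _TABLES[0][m & 255]
--         + _TABLES[1][m >> 8 & 255]
--         + _TABLES[2][m >> 16 & 255]
--         + _TABLES[3][m >> 24 & 255]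
--     )
-- ===== Notes on version B (the rewrite author's own statement) =====
-- stated objective: alternative
-- what changed: A tests each of the 32 bit positions in a loop, rebuilding a dict literal per set bit; B precomputes once, at module load, four 256-entry lookup tables mapping each byte value to its decoded fragment, and a call just truncates the mask to 32 bits, splits it into its four bytes and concatenates the four table entries - table-driven decoding with no per-bit loop at call time.
import Mathlib
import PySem

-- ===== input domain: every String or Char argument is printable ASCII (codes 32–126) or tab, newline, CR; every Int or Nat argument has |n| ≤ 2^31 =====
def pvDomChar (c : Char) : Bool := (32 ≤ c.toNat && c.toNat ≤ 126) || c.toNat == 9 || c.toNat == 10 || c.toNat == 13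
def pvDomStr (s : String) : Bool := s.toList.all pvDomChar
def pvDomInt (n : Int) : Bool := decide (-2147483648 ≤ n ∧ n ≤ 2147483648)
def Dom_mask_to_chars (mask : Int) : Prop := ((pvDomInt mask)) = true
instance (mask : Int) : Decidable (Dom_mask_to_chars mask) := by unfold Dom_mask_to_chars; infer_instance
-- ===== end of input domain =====

-- B is table-driven: four precomputed 256-entry tables map each byte value to its decoded
-- fragment, so a call is a 32-bit truncation, a byte split and four lookups (objective: alternative).

-- ===== PORT A =====
-- the dict literal A rebuilds inside the loop (a constant); values as List Char
def aMapper : PySem.Dict Int (List Char) :=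
  PySem.Dict.ofList [((0 : Int), [' ']), (27, ['.']), (28, [',']), (29, ['\'']), (30, ['-']), (31, ['"'])]

-- chars += … is ported as accumulation over List Char (String.mk at the end);
-- `mask & (1 << i)` is PySem.Int.band mask ((1 : Int) <<< (i.toNat : Int))  (0 ≤ i in range(32), exact);
-- chr(i + 96) is [Char.ofNat (i + 96).toNat]
def mask_to_chars (mask : Int) : String :=
  String.mk ((PySem.List.pyRange 0 32 1).foldl
    (fun chars i =>
      if PySem.Int.band mask ((1 : Int) <<< (i.toNat : Int)) ≠ 0 then
        chars ++ aMapper.getD i [Char.ofNat (i + 96).toNat]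
      else chars) [])

-- ===== PORT B =====
def altChars : List Char := " abcdefghijklmnopqrstuvwxyz.,'-\"".toList

-- the comprehension '"".join(_CHARS[pos*8+i] for i in range(8) if v >> i & 1)';
-- _CHARS[pos*8+i] is altChars.getD (pos*8+i) ' ' (the index is < 32 whenever pos < 4, so
-- the default — Python's IndexError branch — is unreachable)
def altFrag (pos v : Nat) : List Char :=
  (List.range 8).flatMap (fun i => if (v >>> i) &&& 1 ≠ 0 then [altChars.getD (pos * 8 + i) ' '] else [])

-- the module-level _TABLES: 4 tables of 256 precomputed fragments
def altTables : List (List (List Char)) :=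
  (List.range 4).map (fun pos => (List.range 256).map (fun v => altFrag pos v))

-- _TABLES[pos][b]: both indices are always in range (pos < 4 literal, b = … & 255 < 256),
-- so the getD defaults (Python's IndexError branch) are unreachable
def altLookup (pos b : Nat) : List Char := (altTables.getD pos []).getD b []

-- m := mask & 0xFFFFFFFF is nonnegative, so taking it as a Nat is exact and the byte
-- splits m & 255, m >> 8 & 255, … are Python's on the nose
def mask_to_chars_alt (mask : Int) : String :=
  let m := (PySem.Int.band mask 0xFFFFFFFF).toNat
  String.mk (altLookup 0 (m &&& 255) ++ altLookup 1 (m >>> 8 &&& 255) ++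
             altLookup 2 (m >>> 16 &&& 255) ++ altLookup 3 (m >>> 24 &&& 255))

-- ===== PRECONDITION & SPEC =====
def Spec_mask_to_chars (mask : Int) (out : String) : Prop := out = mask_to_chars_alt mask
instance (mask : Int) (out : String) : Decidable (Spec_mask_to_chars mask out) := by unfold Spec_mask_to_chars; infer_instance

-- ===== CLAIM (what is proved, stated in full; the proofs are below) =====
def Claim_equal_mask_to_chars : Prop := ∀ (mask : Int), Dom_mask_to_chars mask → Spec_mask_to_chars mask (mask_to_chars mask)

-- ===== LEMMAS AND PROOFS =====

-- the character B's table assigns to bit j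
def bitChar (j : Nat) : List Char := [altChars.getD j ' ']

-- the character A assigns to bit j (dict lookup with chr fallback)
def aChar (j : Nat) : List Char := aMapper.getD (j : Int) [Char.ofNat (j + 96)]

theorem aChar_eq_bitChar : ∀ j < 32, aChar j = bitChar j := by decide

theorem and_ldiff_add (a b : Nat) : (a &&& b) + a.ldiff b = a := by
  induction a using Nat.strong_induction_on generalizing b with
  | _ a ih =>
    rcases Nat.eq_zero_or_pos a with rfl | ha
    · have h2 : Nat.ldiff 0 b = 0 := by
        apply Nat.eq_of_testBit_eq; intro i
        simp [Nat.testBit_ldiff, Nat.zero_testBit]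
      simp [h2]
    · have IH := ih (a / 2) (Nat.div_lt_self ha (by norm_num)) (b / 2)
      have hAd : (a &&& b) / 2 = a / 2 &&& b / 2 := by
        apply Nat.eq_of_testBit_eq; intro i
        simp only [← Nat.testBit_succ, Nat.testBit_and]
      have hLd : (a.ldiff b) / 2 = (a / 2).ldiff (b / 2) := by
        apply Nat.eq_of_testBit_eq; intro i
        simp only [← Nat.testBit_succ, Nat.testBit_ldiff]
      have hAm := Nat.testBit_and a b 0
      have hLm := Nat.testBit_ldiff a b 0
      simp only [Nat.testBit_zero] at hAm hLm
      by_cases pa : a % 2 = 1 <;> by_cases pb : b % 2 = 1 <;>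
          simp only [pa, pb, decide_true, decide_false, Bool.and_true, Bool.and_false,
            Bool.not_true, Bool.not_false, decide_eq_true_eq,
            decide_eq_false_iff_not] at hAm hLm <;>
        omega

theorem sub_and_eq_ldiff (a b : Nat) : a - (a &&& b) = a.ldiff b := by
  have h := and_ldiff_add a b
  omega

-- master bit bridge: band mask 0xFFFFFFFF is a Nat below 2^32 whose bit j (j < 32)
-- is set iff A's test `mask & (1 << j)` is nonzero
theorem band_mask_bits (mask : Int) :
    ∃ n : Nat, PySem.Int.band mask 0xFFFFFFFF = (n : Int) ∧ n < 2 ^ 32 ∧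
      ∀ j : Nat, j < 32 → ((PySem.Int.band mask ((1 : Int) <<< ((j : Nat) : Int)) ≠ 0) ↔ n.testBit j) := by
  have hKt : (0xFFFFFFFF : Int).toNat = 2 ^ 32 - 1 := by
    rw [show (0xFFFFFFFF : Int).toNat = 4294967295 from rfl]; norm_num
  have hpow : ∀ j : Nat, (1 : Int) <<< ((j : Nat) : Int) = ((2 ^ j : Nat) : Int) := by
    intro j
    rw [Int.shiftLeft_eq_mul_pow, one_mul]
  by_cases hm : 0 ≤ mask
  · refine ⟨mask.toNat &&& (2 ^ 32 - 1), ?_, ?_, ?_⟩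
    · rw [PySem.Int.band_of_nonneg hm (by norm_num), hKt]
    · have := @Nat.and_le_right mask.toNat (2 ^ 32 - 1); omega
    · intro j hj
      rw [hpow j, PySem.Int.band_of_nonneg hm (Int.natCast_nonneg _)]
      rw [Int.toNat_natCast, Nat.and_two_pow]
      rw [Nat.testBit_and, Nat.testBit_two_pow_sub_one]
      have hp : (0 : Nat) < 2 ^ j := Nat.two_pow_pos j
      cases h : mask.toNat.testBit j <;> simp [hj]
  · set m : Nat := (-mask - 1).toNat with hmdef
    refine ⟨2 ^ 32 - 1 - ((2 ^ 32 - 1) &&& m), ?_, ?_, ?_⟩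
    · show PySem.Int.band mask 0xFFFFFFFF = _
      unfold PySem.Int.band
      rw [if_neg hm, if_pos (by norm_num : (0 : Int) ≤ 0xFFFFFFFF), hKt]
    · omega
    · intro j hj
      have hbandj : PySem.Int.band mask ((1 : Int) <<< ((j : Nat) : Int)) =
          (((2 ^ j : Nat) - ((2 ^ j : Nat) &&& m) : Nat) : Int) := by
        rw [hpow j]
        unfold PySem.Int.band
        rw [if_neg hm, if_pos (Int.natCast_nonneg (2 ^ j : Nat)), Int.toNat_natCast]
      rw [hbandj, sub_and_eq_ldiff, sub_and_eq_ldiff]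
      rw [Nat.testBit_ldiff, Nat.testBit_two_pow_sub_one]
      have h2 : ((2 ^ j : Nat).ldiff m) = 2 ^ j - (2 ^ j &&& m) := (sub_and_eq_ldiff _ _).symm
      rw [h2, Nat.two_pow_and]
      have hp : (0 : Nat) < 2 ^ j := Nat.two_pow_pos j
      cases h : m.testBit j <;> simp [hj]

-- A's fold equals the flatMap over bit indices 0..31 with B's per-bit character
theorem mask_to_chars_eq_flatMap (mask : Int) (n : Nat)
    (hbits : ∀ j : Nat, j < 32 → ((PySem.Int.band mask ((1 : Int) <<< ((j : Nat) : Int)) ≠ 0) ↔ n.testBit j)) :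
    mask_to_chars mask =
      String.mk ((List.range 32).flatMap (fun j => if n.testBit j then bitChar j else [])) := by
  unfold mask_to_chars
  have hbody : (fun (chars : List Char) (i : Int) =>
        if PySem.Int.band mask ((1 : Int) <<< (i.toNat : Int)) ≠ 0 then
          chars ++ aMapper.getD i [Char.ofNat (i + 96).toNat]
        else chars)
      = (fun chars i => chars ++
          (if PySem.Int.band mask ((1 : Int) <<< (i.toNat : Int)) ≠ 0 then
            aMapper.getD i [Char.ofNat (i + 96).toNat] else [])) := by
    funext chars i
    by_cases h : PySem.Int.band mask ((1 : Int) <<< (i.toNat : Int)) ≠ 0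
    · rw [if_pos h, if_pos h]
    · rw [if_neg h, if_neg h, List.append_nil]
  rw [hbody, PySem.List.foldl_append_eq_flatMap, PySem.List.pyRange_one]
  rw [List.nil_append, List.flatMap_map]
  rw [show ((32 : Int) - 0).toNat = 32 from rfl]
  congr 1
  apply List.flatMap_congr
  intro j hj
  have hj32 : j < 32 := List.mem_range.mp hj
  show (if PySem.Int.band mask ((1 : Int) <<< ((((0 : Int) + (j : Int)).toNat : Nat) : Int)) ≠ 0 then
      aMapper.getD ((0 : Int) + (j : Int)) [Char.ofNat (((0 : Int) + (j : Int)) + 96).toNat] else [])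
    = (if n.testBit j then bitChar j else [])
  rw [zero_add, Int.toNat_natCast]
  rw [show (((j : Nat) : Int) + 96).toNat = j + 96 by omega]
  have hdict : aMapper.getD ((j : Nat) : Int) [Char.ofNat (j + 96)] = aChar j := rfl
  rw [hdict]
  by_cases hb : n.testBit j
  · rw [if_pos ((hbits j hj32).mpr hb), if_pos hb, aChar_eq_bitChar j hj32]
  · rw [if_neg (fun h => hb ((hbits j hj32).mp h)), if_neg hb]

-- getD on a mapped range is just the function (index in range)
theorem getD_map_range {α : Type} (N k : Nat) (f : Nat → α) (d : α) (h : k < N) :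
    ((List.range N).map f).getD k d = f k := by
  rw [List.getD_eq_getElem?_getD, List.getElem?_map, List.getElem?_range h]
  rfl

-- the table lookup is the fragment it was built from
theorem altLookup_eq (pos b : Nat) (hp : pos < 4) (hb : b < 256) :
    altLookup pos b = altFrag pos b := by
  unfold altLookup altTables
  rw [getD_map_range 4 pos _ _ hp, getD_map_range 256 b _ _ hb]

-- a fragment is the per-bit flatMap of its byte
theorem altFrag_eq_bits (pos v : Nat) :
    altFrag pos v = (List.range 8).flatMap (fun i => if v.testBit i then bitChar (pos * 8 + i) else []) := by
  unfold altFrag bitChar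
  apply List.flatMap_congr
  intro i _
  have ht : v.testBit i = decide ((v >>> i) &&& 1 = 1) := by
    rw [Nat.and_one_is_mod, Nat.shiftRight_eq_div_pow, Nat.testBit_eq_decide_div_mod_eq]
  have hle : (v >>> i) &&& 1 ≤ 1 := Nat.and_le_right
  by_cases h : (v >>> i) &&& 1 = 1
  · rw [if_pos (by omega), if_pos (by rw [ht]; exact decide_eq_true h)]
  · rw [if_neg (by omega), if_neg (by rw [ht]; simp only [decide_eq_true_eq]; exact h)]

-- bit i of byte pos of n is bit pos*8+i of n (i < 8)
theorem byte_testBit (n k i : Nat) (hi : i < 8) :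
    ((n >>> k) &&& 255).testBit i = n.testBit (k + i) := by
  rw [show (255 : Nat) = 2 ^ 8 - 1 from rfl, Nat.testBit_and, Nat.testBit_two_pow_sub_one,
    Nat.testBit_shiftRight]
  simp [hi]

-- ===== VERDICT (by name: the statement is the Claim_ definition above) =====
theorem mask_to_chars_spec : Claim_equal_mask_to_chars := by
  intro mask _
  unfold Spec_mask_to_chars
  obtain ⟨n, hn, hlt, hbits⟩ := band_mask_bits mask
  have hbyte : ∀ k : Nat, (n >>> k) &&& 255 < 256 :=
    fun k => by have := @Nat.and_le_right (n >>> k) 255; omega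
  have hblock : ∀ (k : Nat) (pos : Nat), pos < 4 → k = pos * 8 →
      altLookup pos ((n >>> k) &&& 255) =
        (List.range 8).flatMap (fun i => if n.testBit (k + i) then bitChar (k + i) else []) := by
    intro k pos hp hk
    rw [altLookup_eq pos _ hp (hbyte k), altFrag_eq_bits]
    apply List.flatMap_congr
    intro i hi
    rw [byte_testBit n k i (List.mem_range.mp hi), hk]
  have hB : mask_to_chars_alt mask =
      String.mk ((List.range 32).flatMap (fun j => if n.testBit j then bitChar j else [])) := by
    simp only [mask_to_chars_alt]
    rw [hn, Int.toNat_natCast]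
    have h0 : n &&& 255 = (n >>> 0) &&& 255 := by rw [Nat.shiftRight_zero]
    rw [h0, hblock 0 0 (by norm_num) rfl, hblock 8 1 (by norm_num) rfl,
      hblock 16 2 (by norm_num) rfl, hblock 24 3 (by norm_num) rfl]
    congr 1
    rw [show (32 : Nat) = 8 + 8 + 8 + 8 from rfl, List.range_add, List.range_add,
      List.range_add, List.flatMap_append, List.flatMap_append, List.flatMap_append,
      List.flatMap_map, List.flatMap_map, List.flatMap_map]
    simp only [List.append_assoc, Nat.zero_add]
  rw [mask_to_chars_eq_flatMap mask n hbits, hB]
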